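-- pv_equiv track=rewrite | github.com/emilysanchezz/IML-Wythoff-Array-SP2026 | code_FA25/lib/wythoff.py | k_n_table_creator
-- ===== SOURCE A (Python) =====
-- def k_n_table_creator(period, N=10):
--     curr = "1"
--     prev = "0"
--     final_sequence = [prev, curr] #initial
--
--     for i in range(2, N):
--         next = curr + prev
--
--         if len(next) >= period:
--             k_n = next[:period]
--         else:
--             k_n = next
--
--         final_sequence.append(k_n)
--         curr, prev = next, curr
--
--     return final_sequence
-- ===== SOURCE B (Python) =====
-- def k_n_table_creator(period, N=10):
--     # Two-stage algorithm: (1) compute the capped lengths min(len(s_i), period)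
--     # of the Fibonacci strings by integer arithmetic only; (2) build a single
--     # prefix of the infinite Fibonacci word via the morphism 1->10, 0->1 and
--     # slice every row out of it.  Each s_i is a prefix of that word, so the
--     # rows are exactly A's truncated strings.
--     seq = ["0", "1"]
--     if N <= 2:
--         return seq
--     a, b = min(1, period), min(2, period)
--     lens = [b]
--     for _ in range(3, N):
--         a, b = b, min(a + b, period)
--         lens.append(b)
--     w = "1"
--     while len(w) < lens[-1]:
--         w = "".join("10" if ch == "1" else "1" for ch in w)
--     return seq + [w[:c] for c in lens]
-- ===== Notes on version B (the rewrite author's own statement) =====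
-- stated objective: faster
-- what changed: B replaces A's exponentially-growing string concatenation with two arithmetic/word stages: it first computes the period-capped Fibonacci lengths by pure integer arithmetic, then builds one prefix of the infinite Fibonacci word via the morphism 1->10, 0->1 and slices every row out of that single word.
-- outside the precondition, e.g. on k_n_table_creator(-1, 4): A returns ['0', '1', '1', '10'], B returns ['0', '1', '', '']
import Mathlib
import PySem

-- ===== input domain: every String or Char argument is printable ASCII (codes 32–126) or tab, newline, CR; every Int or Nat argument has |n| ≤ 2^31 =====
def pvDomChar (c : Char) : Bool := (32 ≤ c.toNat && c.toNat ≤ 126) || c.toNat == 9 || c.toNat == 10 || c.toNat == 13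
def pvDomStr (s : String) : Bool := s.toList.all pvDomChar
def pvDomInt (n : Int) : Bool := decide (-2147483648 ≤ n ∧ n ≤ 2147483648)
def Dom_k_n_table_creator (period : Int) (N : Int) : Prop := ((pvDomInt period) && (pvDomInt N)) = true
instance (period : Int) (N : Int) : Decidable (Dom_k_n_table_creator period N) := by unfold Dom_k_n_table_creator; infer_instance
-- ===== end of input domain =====

-- B computes the period-capped Fibonacci lengths arithmetically, then builds one
-- Fibonacci-word prefix by the morphism 1->10, 0->1 and slices every row from it,
-- avoiding A's exponentially growing string concatenations; exact for period >= 0 (Pre_).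


-- ===== PORT A =====
-- one loop iteration of A: state is (curr, prev, final_sequence), strings as List Char
def kntStepA (period : Int) (st : List Char × List Char × List String) (_ : Int) :
    List Char × List Char × List String :=
  let curr := st.1
  let prev := st.2.1
  let acc := st.2.2
  let next := curr ++ prev
  let k_n := if period ≤ (next.length : Int) then PySem.List.slice next none (some period) else next
  (next, curr, acc ++ [String.ofList k_n])

def k_n_table_creator (period : Int) (N : Int) : List String :=
  ((PySem.List.pyRange 2 N 1).foldl (kntStepA period) (['1'], ['0'], ["0", "1"])).2.2

-- ===== PORT B =====
-- the Fibonacci-word morphism 1 -> 10, 0 -> 1  ("".join("10" if ch == "1" else "1" for ch in w))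
def kntMorph (w : List Char) : List Char :=
  w.flatMap (fun ch => if ch = '1' then ['1', '0'] else ['1'])

-- the 'while len(w) < need' loop; fuel only makes the recursion total (need.toNat suffices)
def kntGrow (need : Int) (fuel : Nat) (w : List Char) : List Char :=
  match fuel with
  | 0 => w
  | f + 1 => if (w.length : Int) < need then kntGrow need f (kntMorph w) else w

-- one iteration of B's length loop: a, b = b, min(a + b, period); lens.append(b)
def kntLensStep (period : Int) (st : Int × Int × List Int) (_ : Int) : Int × Int × List Int :=
  let a := st.1
  let b := st.2.1
  let lens := st.2.2
  (b, min (a + b) period, lens ++ [min (a + b) period])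

def k_n_table_creator_alt (period : Int) (N : Int) : List String :=
  if N ≤ 2 then ["0", "1"]
  else
    let lens := ((PySem.List.pyRange 3 N 1).foldl (kntLensStep period)
      (min 1 period, min 2 period, [min 2 period])).2.2
    let need := lens.getLastD 0   -- lens[-1]; lens is nonempty here
    let w := kntGrow need need.toNat ['1']
    ["0", "1"] ++ lens.map (fun c => String.ofList (PySem.List.slice w none (some c)))

-- ===== PRECONDITION & SPEC =====
-- Pre_ restricts to the natural domain of a period LENGTH: for period < 0 (and N ≥ 3, so
-- the loop body runs), A's slice next[:period] drops a Fibonacci-growing suffix of the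
-- full string (a negative-slice artefact outside the function's purpose) which B's
-- capped-length rows do not reproduce.
def Pre_k_n_table_creator (period : Int) (N : Int) : Prop := 0 ≤ period ∨ N ≤ 2
instance (period : Int) (N : Int) : Decidable (Pre_k_n_table_creator period N) := by
  unfold Pre_k_n_table_creator; infer_instance

def pvWitness_k_n_table_creator : Int × Int := (3, 8)

def Spec_k_n_table_creator (period : Int) (N : Int) (out : List String) : Prop := out = k_n_table_creator_alt period N
instance (period : Int) (N : Int) (out : List String) : Decidable (Spec_k_n_table_creator period N out) := by unfold Spec_k_n_table_creator; infer_instance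

-- ===== CLAIM (what is proved, stated in full; the proofs are below) =====
def Claim_equal_k_n_table_creator : Prop := ∀ (period : Int) (N : Int), Dom_k_n_table_creator period N → Pre_k_n_table_creator period N → Spec_k_n_table_creator period N (k_n_table_creator period N)

-- ===== LEMMAS AND PROOFS =====

-- proof-side Fibonacci strings: G 0 = "0", G 1 = "1", G (k+2) = G (k+1) ++ G k;
-- A's curr after n iterations is G (n+1), and every G k (k ≥ 1) is a prefix of the
-- infinite Fibonacci word B materialises.
def kntG : Nat → List Char
  | 0 => ['0']
  | 1 => ['1']
  | (k + 2) => kntG (k + 1) ++ kntG k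

theorem kntG_length_pos : ∀ k, 0 < (kntG k).length
  | 0 => by simp [kntG]
  | 1 => by simp [kntG]
  | (k + 2) => by
      have := kntG_length_pos (k + 1)
      simp [kntG]; omega

theorem kntMorph_append (x y : List Char) : kntMorph (x ++ y) = kntMorph x ++ kntMorph y := by
  simp [kntMorph]

theorem kntMorph_G : ∀ k, kntMorph (kntG k) = kntG (k + 1)
  | 0 => by decide
  | 1 => by decide
  | (k + 2) => by
      show kntMorph (kntG (k + 1) ++ kntG k) = kntG (k + 2) ++ kntG (k + 1)
      rw [kntMorph_append, kntMorph_G (k + 1), kntMorph_G k]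

theorem kntG_length_le_succ : ∀ k, (kntG k).length ≤ (kntG (k + 1)).length
  | 0 => by simp [kntG]
  | (m + 1) => by
      simp [kntG]

theorem kntG_length_mono {j k : Nat} (h : j ≤ k) : (kntG j).length ≤ (kntG k).length := by
  induction h with
  | refl => exact le_refl _
  | step _ ih => exact le_trans ih (kntG_length_le_succ _)

theorem kntG_length_succ_lt : ∀ k, 1 ≤ k → (kntG k).length + 1 ≤ (kntG (k + 1)).length
  | 0, h => by omega
  | (m + 1), _ => by
      have := kntG_length_pos m
      simp [kntG]; omega

theorem kntG_prefix_succ : ∀ k, 1 ≤ k → kntG k <+: kntG (k + 1)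
  | 0, h => by omega
  | (m + 1), _ => ⟨kntG m, rfl⟩

theorem kntG_prefix {j k : Nat} (h1 : 1 ≤ j) (h : j ≤ k) : kntG j <+: kntG k := by
  induction h with
  | refl => exact List.prefix_refl _
  | @step m hm ih => exact ih.trans (kntG_prefix_succ m (le_trans h1 hm))

-- take through a prefix chain: prefixes of any two G's agree where both are long enough
theorem kntG_take_eq {j m n : Nat} (hj : 1 ≤ j) (hm : 1 ≤ m)
    (h1 : n ≤ (kntG j).length) (h2 : n ≤ (kntG m).length) :
    (kntG m).take n = (kntG j).take n := by
  rcases Nat.le_total j m with h | h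
  · obtain ⟨r, hr⟩ := kntG_prefix hj h
    rw [← hr, List.take_append_of_le_length h1]
  · obtain ⟨r, hr⟩ := kntG_prefix hm h
    rw [← hr, List.take_append_of_le_length h2]

-- the grow loop lands on some G m with length ≥ need, given enough fuel
theorem kntGrow_spec (need : Int) : ∀ (fuel : Nat) (k : Nat), 1 ≤ k →
    need ≤ ((kntG k).length : Int) + fuel →
    ∃ m, 1 ≤ m ∧ kntGrow need fuel (kntG k) = kntG m ∧ need ≤ ((kntG m).length : Int) := by
  intro fuel
  induction fuel with
  | zero => intro k hk h; exact ⟨k, hk, rfl, by simpa using h⟩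
  | succ f ih =>
    intro k hk h
    by_cases hlt : ((kntG k).length : Int) < need
    · have hrec := ih (k + 1) (by omega)
        (by have := kntG_length_succ_lt k hk; push_cast at *; omega)
      simp only [kntGrow, if_pos hlt, kntMorph_G]
      exact hrec
    · exact ⟨k, hk, by simp [kntGrow, hlt], by omega⟩

-- A's k_n equals the plain prefix of next, in either branch (period ≥ 0)
theorem knt_kA_eq_take (period : Int) (h : 0 ≤ period) (next : List Char) :
    (if period ≤ (next.length : Int) then PySem.List.slice next none (some period) else next)
      = next.take period.toNat := by
  rw [PySem.List.slice_to _ h]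
  split_ifs with hb
  · rfl
  · exact (List.take_of_length_le (by omega)).symm

-- A's loop invariant
theorem knt_A_loop (p : Int) (hp : 0 ≤ p) : ∀ n : Nat,
    (PySem.List.pyRange 2 (2 + (n : Int)) 1).foldl (kntStepA p) (kntG 1, kntG 0, ["0", "1"])
      = (kntG (n + 1), kntG n,
         ["0", "1"] ++ (List.range n).map (fun t => String.ofList ((kntG (t + 2)).take p.toNat))) := by
  intro n
  induction n with
  | zero => rw [PySem.List.pyRange_one_eq_nil (by omega)]; rfl
  | succ n ih =>
    have hsplit : (2 + ((n : Int) + 1)) = (2 + (n : Int)) + 1 := by ring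
    rw [show ((n + 1 : Nat) : Int) = (n : Int) + 1 by push_cast; ring, hsplit,
      PySem.List.pyRange_one_succ_right (by omega), List.foldl_append, ih]
    simp only [List.foldl_cons, List.foldl_nil, kntStepA]
    rw [knt_kA_eq_take p hp]
    refine congrArg (fun s => (kntG (n + 2), kntG (n + 1), s)) ?_
    rw [List.range_succ, List.map_append, List.append_assoc]
    rfl

-- capped Fibonacci lengths: c k = min (|G k|) p
theorem knt_c_step (p x y : Int) (hp : 0 ≤ p) (hx : 0 ≤ x) (hy : 0 ≤ y) :
    min (min x p + min y p) p = min (x + y) p := by omega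

theorem knt_lens_loop (p : Int) (hp : 0 ≤ p) : ∀ m : Nat,
    (PySem.List.pyRange 3 (3 + (m : Int)) 1).foldl (kntLensStep p)
        (min 1 p, min 2 p, [min 2 p])
      = (min ((kntG (m + 1)).length : Int) p, min ((kntG (m + 2)).length : Int) p,
         (List.range (m + 1)).map (fun t => min ((kntG (t + 2)).length : Int) p)) := by
  intro m
  induction m with
  | zero => rw [PySem.List.pyRange_one_eq_nil (by omega)]; simp [kntG]
  | succ m ih =>
    have hsplit : (3 + ((m : Int) + 1)) = (3 + (m : Int)) + 1 := by ring
    rw [show ((m + 1 : Nat) : Int) = (m : Int) + 1 by push_cast; ring, hsplit,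
      PySem.List.pyRange_one_succ_right (by omega), List.foldl_append, ih]
    simp only [List.foldl_cons, List.foldl_nil, kntLensStep]
    have hlen3 : ((kntG (m + 3)).length : Int)
        = ((kntG (m + 1)).length : Int) + ((kntG (m + 2)).length : Int) := by
      show ((kntG (m + 2) ++ kntG (m + 1)).length : Int) = _
      push_cast [List.length_append]; ring
    have hc : min (min ((kntG (m + 1)).length : Int) p + min ((kntG (m + 2)).length : Int) p) p
        = min ((kntG (m + 3)).length : Int) p := by
      rw [knt_c_step p _ _ hp (Int.natCast_nonneg _) (Int.natCast_nonneg _), hlen3]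
    rw [hc]
    simp [List.range_succ]

-- one row: the big word's capped prefix is A's truncated string
theorem knt_row_eq (p : Int) (hp : 0 ≤ p) {m' j : Nat} (hm : 1 ≤ m') (hj : 2 ≤ j)
    (hlen : min ((kntG j).length : Int) p ≤ ((kntG m').length : Int)) :
    (kntG m').take (min ((kntG j).length : Int) p).toNat = (kntG j).take p.toNat := by
  have h1 : (min ((kntG j).length : Int) p).toNat ≤ (kntG j).length := by omega
  have h2 : (min ((kntG j).length : Int) p).toNat ≤ (kntG m').length := by omega
  rw [kntG_take_eq (by omega) hm h1 h2]
  have : (min ((kntG j).length : Int) p).toNat = min (kntG j).length p.toNat := by omega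
  rw [this]
  rcases Nat.le_total (kntG j).length p.toNat with h | h
  · rw [min_eq_left h, List.take_length, List.take_of_length_le h]
  · rw [min_eq_right h]

-- ===== VERDICT (by name: the statement is the Claim_ definition above) =====
theorem k_n_table_creator_spec : Claim_equal_k_n_table_creator := by
  intro p N _ hpre
  unfold Spec_k_n_table_creator k_n_table_creator k_n_table_creator_alt
  by_cases hN : N ≤ 2
  · rw [if_pos hN, PySem.List.pyRange_one_eq_nil (by omega)]
    rfl
  · have hp : 0 ≤ p := by
      rcases hpre with h | h
      · exact h
      · omega
    rw [if_neg hN]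
    obtain ⟨m, hm⟩ : ∃ m : Nat, N = 3 + (m : Int) := ⟨(N - 3).toNat, by omega⟩
    subst hm
    -- A side
    have hA := knt_A_loop p hp (m + 1)
    rw [show (2 + ((m + 1 : Nat) : Int)) = 3 + (m : Int) by push_cast; ring] at hA
    simp only [show kntG 1 = ['1'] from rfl, show kntG 0 = ['0'] from rfl] at hA
    rw [hA]
    -- B side: the length loop
    rw [knt_lens_loop p hp m]
    dsimp only
    -- the last capped length
    have hlast : ((List.range (m + 1)).map
        (fun t => min ((kntG (t + 2)).length : Int) p)).getLastD 0
        = min ((kntG (m + 2)).length : Int) p := by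
      simp [List.range_succ]
    rw [hlast]
    -- the grown word
    obtain ⟨m', hm', hw, hwlen⟩ :=
      kntGrow_spec (min ((kntG (m + 2)).length : Int) p)
        (min ((kntG (m + 2)).length : Int) p).toNat 1 (le_refl 1)
        (by
          have h1 : (kntG 1).length = 1 := rfl
          omega)
    simp only [show kntG 1 = ['1'] from rfl] at hw
    rw [hw]
    -- rows agree
    refine congrArg (fun l => ["0", "1"] ++ l) ?_
    rw [List.map_map]
    refine List.map_congr_left ?_
    intro t ht
    rw [List.mem_range] at ht
    simp only [Function.comp]
    rw [PySem.List.slice_to _ (le_min (Int.natCast_nonneg _) hp)]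
    refine congrArg String.ofList ?_
    refine (knt_row_eq p hp (j := t + 2) hm' (by omega) ?_).symm
    have hmono : ((kntG (t + 2)).length : Int) ≤ ((kntG (m + 2)).length : Int) := by
      exact_mod_cast kntG_length_mono (by omega)
    omega
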